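-- pv_equiv track=rewrite | github.com/krk-san/AtCoder-Python | venv/ABC183/abc183_d.py | solve
-- ===== SOURCE A (Python) =====
-- def solve(N, W, STP):
--     # imos
--     P_sum = [0] * 200100
--
--     for stp in STP:
--         s, t, p = stp
--         P_sum[s] += p
--         P_sum[t] -= p
--
--     for i in range(200010):
--         if P_sum[i] > W:
--             return "No"
--         P_sum[i+1] += P_sum[i]
--
--     return "Yes"
-- ===== SOURCE B (Python) =====
-- def solve(N, W, STP):
--     # Endpoint sweep: sort interval endpoints and keep a running usage total,
--     # netting all deltas that share a time before comparing against W.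
--     if 0 > W:
--         return "No"  # the baseline usage 0 already exceeds W
--     events = []
--     for s, t, p in STP:
--         events.append((s, p))
--         events.append((t, -p))
--     events.sort(key=lambda e: e[0])
--     cur = 0
--     while events:
--         t0 = events[0][0]
--         k = 0
--         while k < len(events) and events[k][0] == t0:
--             cur += events[k][1]
--             k += 1
--         if cur > W:
--             return "No"
--         events = events[k:]
--     return "Yes"
-- ===== Notes on version B (the rewrite author's own statement) =====
-- stated objective: faster
-- what changed: Replaces the fixed 200100-cell imos difference array and its full 200010-step prefix scan with a sorted endpoint-event sweep that nets all deltas at each time before comparing the running total with W.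
-- outside the precondition, e.g. on solve(1, 0, [(200050, 200051, 100)]): A returns 'Yes', B returns 'No'; on solve(1, 5, [(-1, 2, 100)]): A returns 'Yes', B returns 'No'
import Mathlib
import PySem

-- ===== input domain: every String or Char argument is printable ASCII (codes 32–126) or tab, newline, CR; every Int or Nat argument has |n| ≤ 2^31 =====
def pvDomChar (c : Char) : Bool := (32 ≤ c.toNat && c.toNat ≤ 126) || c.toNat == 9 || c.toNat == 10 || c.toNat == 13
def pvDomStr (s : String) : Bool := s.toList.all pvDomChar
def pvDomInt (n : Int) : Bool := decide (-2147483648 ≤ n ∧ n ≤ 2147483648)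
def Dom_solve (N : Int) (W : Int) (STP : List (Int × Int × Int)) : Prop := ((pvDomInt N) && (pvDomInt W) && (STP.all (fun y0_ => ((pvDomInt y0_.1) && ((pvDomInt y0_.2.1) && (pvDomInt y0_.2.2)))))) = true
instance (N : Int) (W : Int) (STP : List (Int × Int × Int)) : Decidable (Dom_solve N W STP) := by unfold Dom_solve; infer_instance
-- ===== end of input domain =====

set_option maxRecDepth 4000


-- B replaces A's fixed 200100-cell imos difference array and its full prefix scan with a sorted
-- endpoint-event sweep that nets all deltas sharing a time before comparing the running total with W.

-- ===== PORT A =====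
def pvAIdx (i : Int) : Int := if i < 0 then i + 200100 else i

def pvASet (P : Array Int) (i : Int) (f : Int → Int) : Array Int :=
  if 0 ≤ pvAIdx i ∧ pvAIdx i < 200100 then
    P.set! (pvAIdx i).toNat (f (P.getD (pvAIdx i).toNat 0))
  else P

def pvALoop (W : Int) (P : Array Int) (i : Nat) : String :=
  if i < 200010 then
    if P.getD i 0 > W then "No"
    else pvALoop W (P.set! (i + 1) (P.getD (i + 1) 0 + P.getD i 0)) (i + 1)
  else "Yes"
  termination_by 200010 - i
  decreasing_by omega

def solve (N : Int) (W : Int) (STP : List (Int × Int × Int)) : String :=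
  let P0 := STP.foldl (fun P stp =>
      pvASet (pvASet P stp.1 (fun v => v + stp.2.2)) stp.2.1 (fun v => v - stp.2.2))
    (Array.replicate 200100 0)
  pvALoop W P0 0

-- ===== PORT B =====
def pvBEvents (STP : List (Int × Int × Int)) : List (Int × Int) :=
  STP.foldl (fun es stp => es ++ [(stp.1, stp.2.2), (stp.2.1, -stp.2.2)]) []

def pvBSweep (W : Int) (cur : Int) (events : List (Int × Int)) : String :=
  match events with
  | [] => "Yes"
  | (t0, d) :: tl =>
    let cur' := (((t0, d) :: tl).takeWhile (fun e => e.1 == t0)).foldl (fun c e => c + e.2) cur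
    if cur' > W then "No"
    else pvBSweep W cur' (((t0, d) :: tl).dropWhile (fun e => e.1 == t0))
  termination_by events.length
  decreasing_by
    simp only [List.dropWhile_cons, beq_self_eq_true, if_true]
    exact Nat.lt_succ_of_le (List.length_dropWhile_le _ _)

def solve_alt (N : Int) (W : Int) (STP : List (Int × Int × Int)) : String :=
  if 0 > W then "No"
  else pvBSweep W 0 (PySem.List.sorted (pvBEvents STP) (fun e => e.1) false)

-- ===== PRECONDITION & SPEC =====
-- Pre_ admits inputs whose interval endpoints all lie in [0, 200010) (the time window A's scan
-- checks), plus no-op triples (p = 0, or s = t) and inputs with W ≥ Σ|p| (always "Yes"), with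
-- endpoints in [-200100, 200100) so A does not raise; it excludes inputs where A raises
-- IndexError (an endpoint beyond ±200100) and inputs where an effective delta lands, by Python
-- index wraparound or by exceeding the scanned window, in cells of the hard-coded array that the
-- scan never reads — an artefact of the fixed array size that B does not reproduce.
def pvOk (v : Int) : Prop := -200100 ≤ v ∧ v < 200100

def Pre_solve (N : Int) (W : Int) (STP : List (Int × Int × Int)) : Prop :=
  (∀ x ∈ STP, (0 ≤ x.1 ∧ x.1 < 200010 ∧ 0 ≤ x.2.1 ∧ x.2.1 < 200010) ∨
    (x.2.2 = 0 ∧ pvOk x.1 ∧ pvOk x.2.1) ∨ (x.1 = x.2.1 ∧ pvOk x.1)) ∨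
  ((∀ x ∈ STP, pvOk x.1 ∧ pvOk x.2.1) ∧ (STP.map (fun x => |x.2.2|)).sum ≤ W)
instance (N : Int) (W : Int) (STP : List (Int × Int × Int)) : Decidable (Pre_solve N W STP) := by
  unfold Pre_solve pvOk; infer_instance

def pvWitness_solve : Int × Int × (List (Int × Int × Int)) := (2, 5, [(1, 3, 3), (2, 4, 4)])

def Spec_solve (N : Int) (W : Int) (STP : List (Int × Int × Int)) (out : String) : Prop := out = solve_alt N W STP
instance (N : Int) (W : Int) (STP : List (Int × Int × Int)) (out : String) : Decidable (Spec_solve N W STP out) := by unfold Spec_solve; infer_instance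

-- ===== CLAIM (what is proved, stated in full; the proofs are below) =====
def Claim_equal_solve : Prop := ∀ (N : Int) (W : Int) (STP : List (Int × Int × Int)), Dom_solve N W STP → Pre_solve N W STP → Spec_solve N W STP (solve N W STP)

-- ===== LEMMAS AND PROOFS =====

-- net change an event list causes at time x, and cumulative usage through time t
def pvEDelta (es : List (Int × Int)) (x : Int) : Int :=
  (es.map (fun e => if e.1 = x then e.2 else 0)).sum

def pvESum (es : List (Int × Int)) (t : Int) : Int :=
  (es.map (fun e => if e.1 ≤ t then e.2 else 0)).sum

-- A's array cells as (wrapped cell, delta) events, the cell-level delta, and A's cumulative sums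
def wEvents (STP : List (Int × Int × Int)) : List (Int × Int) :=
  STP.flatMap (fun stp => [(pvAIdx stp.1, stp.2.2), (pvAIdx stp.2.1, -stp.2.2)])

def wDelta (STP : List (Int × Int × Int)) (x : Int) : Int :=
  pvEDelta (wEvents STP) x

def wPref (STP : List (Int × Int × Int)) (i : Nat) : Int :=
  ((List.range (i + 1)).map (fun x : Nat => wDelta STP (x : Int))).sum

theorem wDelta_cons (a : Int × Int × Int) (l : List (Int × Int × Int)) (x : Int) :
    wDelta (a :: l) x = ((if pvAIdx a.1 = x then a.2.2 else 0) +
      (if pvAIdx a.2.1 = x then -a.2.2 else 0)) + wDelta l x := by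
  simp [wDelta, wEvents, pvEDelta, List.flatMap_cons]
  ring

theorem wPref_succ (STP : List (Int × Int × Int)) (i : Nat) :
    wPref STP (i + 1) = wPref STP i + wDelta STP ((i : Int) + 1) := by
  simp [wPref, List.range_succ]
  ring

theorem getD_set! (P : Array Int) (i : Nat) (v : Int) (j : Nat) (hi : i < P.size) :
    (P.set! i v).getD j 0 = if i = j then v else P.getD j 0 := by
  simp [Array.set!, Array.getD_eq_getD_getElem?, Array.getElem?_setIfInBounds, hi]
  split <;> simp_all

theorem size_pvASet (P : Array Int) (i : Int) (f : Int → Int) : (pvASet P i f).size = P.size := by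
  unfold pvASet
  split <;> simp [Array.set!]

theorem pvASet_getD (P : Array Int) (i : Int) (f : Int → Int) (j : Nat)
    (hok : -200100 ≤ i ∧ i < 200100) (hs : P.size = 200100) :
    (pvASet P i f).getD j 0 = if pvAIdx i = (j : Int) then f (P.getD j 0) else P.getD j 0 := by
  have hb : 0 ≤ pvAIdx i ∧ pvAIdx i < 200100 := by unfold pvAIdx; split <;> omega
  unfold pvASet
  rw [if_pos hb]
  rw [getD_set! _ _ _ _ (by omega)]
  by_cases h : pvAIdx i = (j : Int)
  · simp [h]
  · have ht : ¬ (pvAIdx i).toNat = j := by omega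
    simp [h, ht]

theorem pvBuild_spec (l : List (Int × Int × Int)) (P : Array Int)
    (hl : ∀ x ∈ l, (-200100 ≤ x.1 ∧ x.1 < 200100) ∧ (-200100 ≤ x.2.1 ∧ x.2.1 < 200100))
    (hs : P.size = 200100) :
    (l.foldl (fun P stp =>
        pvASet (pvASet P stp.1 (fun v => v + stp.2.2)) stp.2.1 (fun v => v - stp.2.2)) P).size = 200100 ∧
    ∀ j : Nat, j < 200100 →
      (l.foldl (fun P stp =>
          pvASet (pvASet P stp.1 (fun v => v + stp.2.2)) stp.2.1 (fun v => v - stp.2.2)) P).getD j 0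
        = P.getD j 0 + wDelta l (j : Int) := by
  induction l generalizing P with
  | nil => simp [wDelta, wEvents, pvEDelta, hs]
  | cons a l ih =>
    have ha := hl a (by simp)
    have hmem : ∀ x ∈ l, (-200100 ≤ x.1 ∧ x.1 < 200100) ∧ (-200100 ≤ x.2.1 ∧ x.2.1 < 200100) :=
      fun x hx => hl x (List.mem_cons_of_mem _ hx)
    have hs1 : (pvASet (pvASet P a.1 (fun v => v + a.2.2)) a.2.1 (fun v => v - a.2.2)).size = 200100 := by
      rw [size_pvASet, size_pvASet, hs]
    obtain ⟨ihs, ihg⟩ := ih (pvASet (pvASet P a.1 (fun v => v + a.2.2)) a.2.1 (fun v => v - a.2.2)) hmem hs1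
    refine ⟨by simpa using ihs, ?_⟩
    intro j hj
    rw [List.foldl_cons, ihg j hj]
    rw [pvASet_getD _ _ _ _ ha.2 (by rw [size_pvASet, hs])]
    rw [pvASet_getD _ _ _ _ ha.1 hs]
    rw [wDelta_cons]
    split_ifs <;> ring

theorem pvALoop_aux (W : Int) (STP : List (Int × Int × Int)) :
    ∀ n i P, 200010 - i ≤ n → P.size = 200100 →
    P.getD i 0 = wPref STP i →
    (∀ j : Nat, i < j → j < 200100 → P.getD j 0 = wDelta STP (j : Int)) →
    pvALoop W P i = if ∃ j ∈ Finset.Ico i 200010, wPref STP j > W then "No" else "Yes" := by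
  intro n
  induction n with
  | zero =>
    intro i P hn hs hcur hrest
    have hi : ¬ i < 200010 := by omega
    rw [pvALoop, if_neg hi]
    rw [if_neg]
    rintro ⟨j, hj, -⟩
    simp only [Finset.mem_Ico] at hj
    omega
  | succ n ih =>
    intro i P hn hs hcur hrest
    by_cases hi : i < 200010
    · rw [pvALoop, if_pos hi]
      by_cases hgt : P.getD i 0 > W
      · rw [if_pos hgt, if_pos]
        exact ⟨i, Finset.mem_Ico.mpr ⟨le_refl _, hi⟩, by rw [← hcur]; exact hgt⟩
      · rw [if_neg hgt]
        have hstep := getD_set! P (i + 1) (P.getD (i + 1) 0 + P.getD i 0)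
        have hcur' : (P.set! (i + 1) (P.getD (i + 1) 0 + P.getD i 0)).getD (i + 1) 0 = wPref STP (i + 1) := by
          rw [hstep _ (by omega), if_pos rfl, hrest (i + 1) (by omega) (by omega), hcur, wPref_succ]
          push_cast
          ring
        have hrest' : ∀ j : Nat, i + 1 < j → j < 200100 →
            (P.set! (i + 1) (P.getD (i + 1) 0 + P.getD i 0)).getD j 0 = wDelta STP (j : Int) := by
          intro j h1 h2
          rw [hstep _ (by omega), if_neg (by omega), hrest j (by omega) h2]
        rw [ih (i + 1) _ (by omega) (by simp [Array.set!, hs]) hcur' hrest']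
        have hiff : (∃ j ∈ Finset.Ico (i + 1) 200010, wPref STP j > W) ↔
            (∃ j ∈ Finset.Ico i 200010, wPref STP j > W) := by
          constructor
          · rintro ⟨j, hj, hgt2⟩
            simp only [Finset.mem_Ico] at hj
            exact ⟨j, Finset.mem_Ico.mpr ⟨by omega, hj.2⟩, hgt2⟩
          · rintro ⟨j, hj, hgt2⟩
            simp only [Finset.mem_Ico] at hj
            refine ⟨j, Finset.mem_Ico.mpr ⟨?_, hj.2⟩, hgt2⟩
            rcases Nat.eq_or_lt_of_le hj.1 with h | h
            · exfalso; rw [← h] at hgt2; rw [← hcur] at hgt2; exact hgt hgt2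
            · omega
        rw [if_congr hiff rfl rfl]
    · rw [pvALoop, if_neg hi, if_neg]
      rintro ⟨j, hj, -⟩
      simp only [Finset.mem_Ico] at hj
      omega

theorem pvBEvents_eq_flatMap (STP : List (Int × Int × Int)) :
    pvBEvents STP = STP.flatMap (fun stp => [(stp.1, stp.2.2), (stp.2.1, -stp.2.2)]) := by
  unfold pvBEvents
  rw [PySem.List.foldl_append_eq_flatMap]
  rfl

theorem foldl_add_snd (l : List (Int × Int)) (c : Int) :
    l.foldl (fun c e => c + e.2) c = c + (l.map Prod.snd).sum := by
  induction l generalizing c with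
  | nil => simp
  | cons a l ih => simp [ih]; ring

theorem dropWhile_head_false {α : Type} (p : α → Bool) :
    ∀ (l : List α) (x : α) (xs : List α), l.dropWhile p = x :: xs → p x = false := by
  intro l
  induction l with
  | nil => intro x xs h; simp [List.dropWhile] at h
  | cons a t ih =>
    intro x xs h
    rw [List.dropWhile_cons] at h
    by_cases hp : p a
    · rw [if_pos hp] at h; exact ih x xs h
    · rw [if_neg hp] at h
      obtain ⟨rfl, -⟩ := List.cons.inj h
      simpa using hp

theorem pvESum_congr (es : List (Int × Int)) (t u : Int)
    (h : ∀ e ∈ es, (e.1 ≤ t ↔ e.1 ≤ u)) : pvESum es t = pvESum es u := by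
  unfold pvESum
  congr 1
  apply List.map_congr_left
  intro e he
  by_cases hc : e.1 ≤ t
  · rw [if_pos hc, if_pos ((h e he).mp hc)]
  · rw [if_neg hc, if_neg (fun hcu => hc ((h e he).mpr hcu))]

theorem pvESum_zero (es : List (Int × Int)) (t : Int)
    (h : ∀ e ∈ es, t < e.1) : pvESum es t = 0 := by
  unfold pvESum
  apply List.sum_eq_zero
  intro x hx
  obtain ⟨e, he, rfl⟩ := List.mem_map.mp hx
  rw [if_neg (by have := h e he; omega)]

theorem pvBSweep_aux (W : Int) :
    ∀ (n : Nat) (es : List (Int × Int)) (cur : Int), es.length ≤ n →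
    es.Pairwise (fun a b => a.1 ≤ b.1) →
    pvBSweep W cur es = if ∃ e ∈ es, cur + pvESum es e.1 > W then "No" else "Yes" := by
  intro n
  induction n with
  | zero =>
    intro es cur hn _
    have : es = [] := List.length_eq_zero_iff.mp (Nat.le_zero.mp hn)
    subst this
    simp [pvBSweep]
  | succ n ih =>
    intro es cur hn hsort
    match es with
    | [] => simp [pvBSweep]
    | (t0, d) :: tl =>
      rw [pvBSweep]
      have hsort_tl := (List.pairwise_cons.mp hsort).2
      have hhead : ∀ e ∈ tl, t0 ≤ e.1 := fun e he => (List.pairwise_cons.mp hsort).1 e he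
      have hsplit : (((t0, d) :: tl).takeWhile (fun e => e.1 == t0)) ++
          (((t0, d) :: tl).dropWhile (fun e => e.1 == t0)) = (t0, d) :: tl :=
        List.takeWhile_append_dropWhile
      have hgrp : ∀ e ∈ ((t0, d) :: tl).takeWhile (fun e => e.1 == t0), e.1 = t0 := by
        intro e he
        have hb := List.mem_takeWhile_imp he
        simpa using hb
      have hrest_sub : (((t0, d) :: tl).dropWhile (fun e => e.1 == t0)).Sublist ((t0, d) :: tl) :=
        List.dropWhile_sublist _
      have hrest_gt : ∀ e ∈ ((t0, d) :: tl).dropWhile (fun e => e.1 == t0), t0 < e.1 := by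
        intro e he
        match hr : ((t0, d) :: tl).dropWhile (fun e => e.1 == t0) with
        | [] => rw [hr] at he; simp at he
        | r0 :: rs =>
          have hr0f : (fun e : Int × Int => e.1 == t0) r0 = false :=
            dropWhile_head_false (fun e : Int × Int => e.1 == t0) _ _ _ hr
          have hr0ne : r0.1 ≠ t0 := by simpa using hr0f
          have hr0mem : r0 ∈ (t0, d) :: tl := hrest_sub.mem (by rw [hr]; simp)
          have hr0ge : t0 ≤ r0.1 := by
            rcases List.mem_cons.mp hr0mem with h | h
            · rw [h]
            · exact hhead r0 h
          have hr0gt : t0 < r0.1 := lt_of_le_of_ne hr0ge (Ne.symm hr0ne)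
          have hpw : (r0 :: rs).Pairwise (fun a b : Int × Int => a.1 ≤ b.1) := by
            rw [← hr]; exact hsort.sublist hrest_sub
          rw [hr] at he
          rcases List.mem_cons.mp he with h | h
          · rw [h]; exact hr0gt
          · exact lt_of_lt_of_le hr0gt ((List.pairwise_cons.mp hpw).1 e h)
      rw [foldl_add_snd]
      set G := ((t0, d) :: tl).takeWhile (fun e => e.1 == t0) with hG
      set R := ((t0, d) :: tl).dropWhile (fun e => e.1 == t0) with hR
      have hsum_split : ∀ t : Int, pvESum ((t0, d) :: tl) t = pvESum G t + pvESum R t := by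
        intro t
        rw [← hsplit]
        simp [pvESum]
      have hGsum : pvESum G t0 = (G.map Prod.snd).sum := by
        unfold pvESum
        congr 1
        apply List.map_congr_left
        intro e he
        rw [if_pos (le_of_eq (hgrp e he))]
      have hcurr : cur + pvESum ((t0, d) :: tl) t0 = cur + (G.map Prod.snd).sum := by
        rw [hsum_split, hGsum, pvESum_zero R t0 hrest_gt]
        ring
      have hRlen : R.length ≤ n := by
        have : R = tl.dropWhile (fun e => e.1 == t0) := by
          rw [hR, List.dropWhile_cons]
          simp
        rw [this]
        have := List.length_dropWhile_le (fun e : Int × Int => e.1 == t0) tl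
        simp at hn
        omega
      have hRsort : R.Pairwise (fun a b : Int × Int => a.1 ≤ b.1) := hsort.sublist hrest_sub
      by_cases hgt : cur + (G.map Prod.snd).sum > W
      · rw [if_pos hgt, if_pos ⟨(t0, d), by simp, by rw [hcurr]; exact hgt⟩]
      · rw [if_neg hgt, ih R (cur + (G.map Prod.snd).sum) hRlen hRsort]
        have heq : ∀ e ∈ R, cur + pvESum ((t0, d) :: tl) e.1
            = cur + (G.map Prod.snd).sum + pvESum R e.1 := by
          intro e he
          rw [hsum_split, show pvESum G e.1 = (G.map Prod.snd).sum from by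
            unfold pvESum
            congr 1
            apply List.map_congr_left
            intro g hg
            rw [if_pos (by rw [hgrp g hg]; exact le_of_lt (hrest_gt e he))]]
          ring
        have hiff : (∃ e ∈ R, cur + (G.map Prod.snd).sum + pvESum R e.1 > W) ↔
            (∃ e ∈ (t0, d) :: tl, cur + pvESum ((t0, d) :: tl) e.1 > W) := by
          constructor
          · rintro ⟨e, he, hgt2⟩
            exact ⟨e, hrest_sub.mem he, by rw [heq e he]; exact hgt2⟩
          · rintro ⟨e, he, hgt2⟩
            rcases List.mem_append.mp (by rw [hsplit]; exact he) with h | h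
            · exfalso
              apply hgt
              have he1 : e.1 = t0 := hgrp e h
              rw [he1] at hgt2
              rw [hcurr] at hgt2
              exact hgt2
            · exact ⟨e, h, by rw [← heq e h]; exact hgt2⟩
        rw [if_congr hiff rfl rfl]

theorem pvBSweep_spec (W cur : Int) (es : List (Int × Int))
    (hsort : es.Pairwise (fun a b => a.1 ≤ b.1)) :
    pvBSweep W cur es = if ∃ e ∈ es, cur + pvESum es e.1 > W then "No" else "Yes" :=
  pvBSweep_aux W es.length es cur (le_refl _) hsort

theorem sum_indicator (a c : Int) (n : Nat) :
    ((List.range n).map (fun x : Nat => if a = (x : Int) then c else 0)).sum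
      = if 0 ≤ a ∧ a < (n : Int) then c else 0 := by
  induction n with
  | zero =>
    simp only [List.range_zero, List.map_nil, List.sum_nil]
    rw [if_neg (by push_cast; omega)]
  | succ n ih =>
    rw [List.range_succ, List.map_append, List.sum_append, ih]
    simp only [List.map_cons, List.map_nil, List.sum_cons, List.sum_nil]
    by_cases h : a = (n : Int)
    · rw [if_neg (by omega), if_pos h, if_pos (by omega)]
      ring
    · rw [if_neg h]
      by_cases h2 : 0 ≤ a ∧ a < (n : Int)
      · rw [if_pos h2, if_pos (by push_cast; omega)]
        ring
      · rw [if_neg h2, if_neg (by push_cast at *; omega)]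
        ring

theorem range_eDelta (n : Nat) (es : List (Int × Int)) :
    ((List.range n).map (fun x : Nat => pvEDelta es (x : Int))).sum
      = (es.map (fun e => if 0 ≤ e.1 ∧ e.1 < (n : Int) then e.2 else 0)).sum := by
  induction es with
  | nil => simp [pvEDelta]
  | cons e es ih =>
    simp only [pvEDelta, List.map_cons, List.sum_cons] at *
    rw [show (List.map (fun x : Nat => (if e.1 = (x : Int) then e.2 else 0) +
        (List.map (fun e' => if e'.1 = (x : Int) then e'.2 else 0) es).sum) (List.range n))
        = List.map (fun x : Nat => (fun x : Nat => if e.1 = (x : Int) then e.2 else 0) x +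
          (fun x : Nat => (List.map (fun e' => if e'.1 = (x : Int) then e'.2 else 0) es).sum) x)
          (List.range n) from rfl]
    rw [List.sum_map_add, ih, sum_indicator]

-- per-triple (block) representations of A's cumulative sums and B's cumulative sums
theorem wPref_triples (STP : List (Int × Int × Int)) (j : Nat) :
    wPref STP j = (STP.map (fun x =>
      (if 0 ≤ pvAIdx x.1 ∧ pvAIdx x.1 ≤ (j : Int) then x.2.2 else 0) +
      (if 0 ≤ pvAIdx x.2.1 ∧ pvAIdx x.2.1 ≤ (j : Int) then -x.2.2 else 0))).sum := by
  unfold wPref wDelta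
  rw [range_eDelta]
  unfold wEvents
  induction STP with
  | nil => simp
  | cons a l ih =>
    simp only [List.flatMap_cons, List.map_append, List.sum_append, List.map_cons, List.sum_cons,
      List.map_nil, List.sum_nil] at *
    rw [ih]
    have h1 : (0 ≤ pvAIdx a.1 ∧ pvAIdx a.1 < ((j : Nat) + 1 : Nat)) ↔
        (0 ≤ pvAIdx a.1 ∧ pvAIdx a.1 ≤ (j : Int)) := by push_cast; omega
    have h2 : (0 ≤ pvAIdx a.2.1 ∧ pvAIdx a.2.1 < ((j : Nat) + 1 : Nat)) ↔
        (0 ≤ pvAIdx a.2.1 ∧ pvAIdx a.2.1 ≤ (j : Int)) := by push_cast; omega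
    rw [if_congr h1 rfl rfl, if_congr h2 rfl rfl]
    ring

theorem pvESum_triples (STP : List (Int × Int × Int)) (u : Int) :
    pvESum (pvBEvents STP) u = (STP.map (fun x =>
      (if x.1 ≤ u then x.2.2 else 0) + (if x.2.1 ≤ u then -x.2.2 else 0))).sum := by
  rw [pvBEvents_eq_flatMap]
  induction STP with
  | nil => simp [pvESum]
  | cons a l ih =>
    simp only [pvESum, List.flatMap_cons, List.map_append, List.sum_append, List.map_cons,
      List.sum_cons, List.map_nil, List.sum_nil] at *
    rw [ih]
    ring

theorem sum_map_congr {α : Type} (l : List α) (f g : α → Int)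
    (h : ∀ x ∈ l, f x = g x) : (l.map f).sum = (l.map g).sum := by
  rw [List.map_congr_left h]

theorem exists_max (E : List (Int × Int)) (j : Int) :
    (∃ e ∈ E, e.1 ≤ j) → ∃ m ∈ E, m.1 ≤ j ∧ ∀ e ∈ E, e.1 ≤ j → e.1 ≤ m.1 := by
  induction E with
  | nil => rintro ⟨e, he, -⟩; simp at he
  | cons a E ih =>
    intro hex
    by_cases hE : ∃ e ∈ E, e.1 ≤ j
    · obtain ⟨m, hm, hmj, hmax⟩ := ih hE
      by_cases ha : a.1 ≤ j ∧ m.1 ≤ a.1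
      · refine ⟨a, by simp, ha.1, ?_⟩
        intro e he hej
        rcases List.mem_cons.mp he with h | h
        · rw [h]
        · exact le_trans (hmax e h hej) ha.2
      · refine ⟨m, List.mem_cons_of_mem _ hm, hmj, ?_⟩
        intro e he hej
        rcases List.mem_cons.mp he with h | h
        · rw [h] at hej ⊢
          by_cases hc : m.1 ≤ a.1
          · exact absurd ⟨hej, hc⟩ ha
          · omega
        · exact hmax e h hej
    · obtain ⟨e, he, hej⟩ := hex
      rcases List.mem_cons.mp he with h | h
      · refine ⟨a, by simp, by rw [← h]; exact hej, ?_⟩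
        intro e' he' hej'
        rcases List.mem_cons.mp he' with h' | h'
        · rw [h']
        · exact absurd ⟨e', h', hej'⟩ hE
      · exact absurd ⟨e, h, hej⟩ hE

theorem solve_eq (N W : Int) (STP : List (Int × Int × Int))
    (hpre : Pre_solve N W STP) :
    solve N W STP = solve_alt N W STP := by
  have hok : ∀ x ∈ STP, (-200100 ≤ x.1 ∧ x.1 < 200100) ∧ (-200100 ≤ x.2.1 ∧ x.2.1 < 200100) := by
    intro x hx
    rcases hpre with hcls | ⟨hoks, _⟩
    · rcases hcls x hx with h | h | h
      · omega
      · exact ⟨h.2.1, h.2.2⟩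
      · obtain ⟨heq, hokx⟩ := h
        rw [← heq]
        exact ⟨⟨hokx.1, hokx.2⟩, ⟨hokx.1, hokx.2⟩⟩
    · exact ⟨(hoks x hx).1, (hoks x hx).2⟩
  -- characterize A
  obtain ⟨hs0, hg0⟩ := pvBuild_spec STP (Array.replicate 200100 0) hok (by simp)
  have hdelta : ∀ j : Nat, j < 200100 →
      (STP.foldl (fun P stp =>
        pvASet (pvASet P stp.1 (fun v => v + stp.2.2)) stp.2.1 (fun v => v - stp.2.2))
        (Array.replicate 200100 0)).getD j 0 = wDelta STP (j : Int) := by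
    intro j hj
    rw [hg0 j hj]
    simp [Array.getD_eq_getD_getElem?, hj]
  have hA : solve N W STP
      = if ∃ j ∈ Finset.Ico (0 : Nat) 200010, wPref STP j > W then "No" else "Yes" := by
    show pvALoop W _ 0 = _
    apply pvALoop_aux W STP 200010 0 _ (by omega) hs0
    · rw [hdelta 0 (by omega)]
      simp [wPref, List.range_succ]
    · intro j h1 h2
      exact hdelta j h2
  -- characterize B
  have hperm : (PySem.List.sorted (pvBEvents STP) (fun e => e.1) false).Perm (pvBEvents STP) :=
    PySem.List.sorted_perm _ _ _
  have hESum : ∀ t : Int, pvESum (PySem.List.sorted (pvBEvents STP) (fun e => e.1) false) t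
      = pvESum (pvBEvents STP) t := by
    intro t
    exact (hperm.map _).sum_eq
  have hB : solve_alt N W STP = if 0 > W then "No" else
      if ∃ e ∈ pvBEvents STP, pvESum (pvBEvents STP) e.1 > W then "No" else "Yes" := by
    unfold solve_alt
    by_cases hW : 0 > W
    · rw [if_pos hW, if_pos hW]
    · rw [if_neg hW, if_neg hW]
      rw [pvBSweep_spec W 0 (PySem.List.sorted (pvBEvents STP) (fun e => e.1) false)
        (PySem.List.sorted_pairwise _ _)]
      apply if_congr _ rfl rfl
      constructor
      · rintro ⟨e, he, hgt⟩
        refine ⟨e, hperm.mem_iff.mp he, ?_⟩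
        rw [← hESum e.1]
        omega
      · rintro ⟨e, he, hgt⟩
        refine ⟨e, hperm.mem_iff.mpr he, ?_⟩
        rw [hESum e.1]
        omega
  rw [hA, hB]
  rcases hpre with hcls | ⟨hoks, hW⟩
  · -- every triple is inside the window or a no-op
    have hAB : ∀ j : Nat, wPref STP j = pvESum (pvBEvents STP) (j : Int) := by
      intro j
      rw [wPref_triples, pvESum_triples]
      apply sum_map_congr
      intro x hx
      rcases hcls x hx with h | h | h
      · have hi1 : pvAIdx x.1 = x.1 := by unfold pvAIdx; rw [if_neg (by omega)]
        have hi2 : pvAIdx x.2.1 = x.2.1 := by unfold pvAIdx; rw [if_neg (by omega)]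
        rw [hi1, hi2]
        rw [if_congr (show (0 ≤ x.1 ∧ x.1 ≤ (j : Int)) ↔ x.1 ≤ (j : Int) from by omega) rfl rfl,
          if_congr (show (0 ≤ x.2.1 ∧ x.2.1 ≤ (j : Int)) ↔ x.2.1 ≤ (j : Int) from by omega) rfl rfl]
      · rw [h.1]
        split_ifs <;> ring
      · rw [h.1]
        split_ifs <;> ring
    have htop : wPref STP 200009 = 0 := by
      rw [wPref_triples]
      apply List.sum_eq_zero
      intro v hv
      obtain ⟨x, hx, rfl⟩ := List.mem_map.mp hv
      rcases hcls x hx with h | h | h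
      · have hi1 : pvAIdx x.1 = x.1 := by unfold pvAIdx; rw [if_neg (by omega)]
        have hi2 : pvAIdx x.2.1 = x.2.1 := by unfold pvAIdx; rw [if_neg (by omega)]
        rw [hi1, hi2, if_pos (by constructor <;> omega), if_pos (by constructor <;> omega)]
        ring
      · rw [h.1]
        split_ifs <;> ring
      · rw [h.1]
        split_ifs <;> ring
    have hzero_neg : ∀ u : Int, u < 0 → pvESum (pvBEvents STP) u = 0 := by
      intro u hu
      rw [pvESum_triples]
      apply List.sum_eq_zero
      intro v hv
      obtain ⟨x, hx, rfl⟩ := List.mem_map.mp hv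
      rcases hcls x hx with h | h | h
      · rw [if_neg (by omega), if_neg (by omega)]
        ring
      · rw [h.1]
        split_ifs <;> ring
      · rw [h.1]
        split_ifs <;> ring
    have hbig : ∀ u : Int, 200010 ≤ u → pvESum (pvBEvents STP) u
        = pvESum (pvBEvents STP) (200009 : Int) := by
      intro u hu
      rw [pvESum_triples, pvESum_triples]
      apply sum_map_congr
      intro x hx
      rcases hcls x hx with h | h | h
      · rw [if_pos (by omega), if_pos (by omega), if_pos (by omega), if_pos (by omega)]
      · rw [h.1]
        split_ifs <;> ring
      · rw [h.1]
        split_ifs <;> ring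
    by_cases hW : 0 > W
    · rw [if_pos hW, if_pos]
      exact ⟨200009, Finset.mem_Ico.mpr (by omega), by rw [htop]; omega⟩
    · rw [if_neg hW]
      apply if_congr _ rfl rfl
      constructor
      · rintro ⟨j, hj, hgt⟩
        rw [hAB j] at hgt
        have hex : ∃ e ∈ pvBEvents STP, e.1 ≤ (j : Int) := by
          by_contra hno
          rw [pvESum_zero _ _ (fun e he => by by_contra hlt; exact hno ⟨e, he, by omega⟩)] at hgt
          omega
        obtain ⟨m, hm, hmj, hmax⟩ := exists_max _ _ hex
        refine ⟨m, hm, ?_⟩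
        rw [pvESum_congr (pvBEvents STP) m.1 (j : Int)
          (fun e he => ⟨fun h => le_trans h hmj, fun h => hmax e he h⟩)]
        exact hgt
      · rintro ⟨e, he, hgt⟩
        rcases lt_trichotomy e.1 0 with hneg | hzero | hpos
        · rw [hzero_neg e.1 hneg] at hgt
          omega
        · refine ⟨0, Finset.mem_Ico.mpr (by omega), ?_⟩
          rw [hAB 0]
          push_cast
          rw [← hzero]
          exact hgt
        · by_cases hwin : e.1 < 200010
          · refine ⟨e.1.toNat, Finset.mem_Ico.mpr (by omega), ?_⟩
            rw [hAB e.1.toNat, show ((e.1.toNat : Nat) : Int) = e.1 from by omega]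
            exact hgt
          · exfalso
            rw [hbig e.1 (by omega)] at hgt
            have h9 := hAB 200009
            push_cast at h9
            rw [← h9, htop] at hgt
            omega
  · -- W dominates the total |p| mass: both sides answer "Yes"
    have habs : ∀ x ∈ STP, (0 : Int) ≤ |x.2.2| := fun x _ => abs_nonneg _
    have hsum0 : (0 : Int) ≤ (STP.map (fun x => |x.2.2|)).sum := by
      apply List.sum_nonneg
      intro v hv
      obtain ⟨x, hx, rfl⟩ := List.mem_map.mp hv
      exact habs x hx
    have hblockW : ∀ j : Nat, wPref STP j ≤ (STP.map (fun x => |x.2.2|)).sum := by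
      intro j
      rw [wPref_triples]
      apply List.sum_le_sum
      intro x hx
      rcases abs_cases x.2.2 with ⟨ha, hb⟩ | ⟨ha, hb⟩ <;> split_ifs <;> omega
    have hblockE : ∀ u : Int, pvESum (pvBEvents STP) u ≤ (STP.map (fun x => |x.2.2|)).sum := by
      intro u
      rw [pvESum_triples]
      apply List.sum_le_sum
      intro x hx
      rcases abs_cases x.2.2 with ⟨ha, hb⟩ | ⟨ha, hb⟩ <;> split_ifs <;> omega
    have hnA : ¬ ∃ j ∈ Finset.Ico (0 : Nat) 200010, wPref STP j > W := by
      rintro ⟨j, hj, hgt⟩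
      have := hblockW j
      omega
    have hnB : ¬ ∃ e ∈ pvBEvents STP, pvESum (pvBEvents STP) e.1 > W := by
      rintro ⟨e, he, hgt⟩
      have := hblockE e.1
      omega
    rw [if_neg hnA, if_neg (show ¬ 0 > W from by omega), if_neg hnB]

-- ===== VERDICT (by name: the statement is the Claim_ definition above) =====
theorem solve_spec : Claim_equal_solve := by
  intro N W STP _ hpre
  show solve N W STP = solve_alt N W STP
  exact solve_eq N W STP hpre
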